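-- pv_equiv track=rewrite | github.com/cclsoftware/ccl-framework | build/configure/cpphint/modules/stringutil.py | extract_call_params_string
-- ===== SOURCE A (Python) =====
-- def extract_call_params_string(search_string: str, macro_name: str) -> str:
--     """Extract called parameters for macro_name.
--
--     Examples:
--
--         "FOO (a, b)" --> "(a, b)"
--         "FOO (BAR (a, b), c) -> "(BAR (a, b), c)"
--     """
--
--     assert macro_name in search_string
--     part = search_string[search_string.index(macro_name):]
--
--     bracket_count = 0
--     result = ""
--     for c in part:
--
--         # Skip everything outside brackets.
--         if c not in ["(", ")"]:
--             if bracket_count == 0: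
--                 continue
--             else:
--                 result += c
--                 continue
--
--         # Increment bracket stack with each opening bracket.
--         if c == "(":
--             result += c
--             bracket_count = bracket_count + 1
--             continue
--
--         # Decrement bracket stack or finalize result for closing bracket
--         if c == ")":
--             assert bracket_count > 0
--             result += c
--             bracket_count = bracket_count - 1
--             if bracket_count == 0:
--                 break
--             else:
--                 continue
--
--     return result
-- ===== SOURCE B (Python) =====
-- def extract_call_params_string(search_string: str, macro_name: str) -> str:
--     """Extract called parameters for macro_name, by locating the span of the
--     first balanced bracket group and slicing it out in one step."""
--
--     assert macro_name in search_string
--     part = search_string[search_string.index(macro_name):]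
--
--     depth = 0
--     start = 0
--     for i, c in enumerate(part):
--         if c == "(":
--             if depth == 0:
--                 start = i
--             depth += 1
--         elif c == ")":
--             assert depth > 0
--             depth -= 1
--             if depth == 0:
--                 return part[start:i + 1]
--     # Unterminated group: everything from the first "(". No group at all: "".
--     return part[start:] if depth > 0 else ""
-- ===== Notes on version B (the rewrite author's own statement) =====
-- stated objective: simpler
-- what changed: B finds the start/end indices of the first balanced bracket group with an enumerate+depth counter and returns a single slice of the suffix, instead of accumulating the result string character by character with explicit continue/break control flow.
import Mathlib
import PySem

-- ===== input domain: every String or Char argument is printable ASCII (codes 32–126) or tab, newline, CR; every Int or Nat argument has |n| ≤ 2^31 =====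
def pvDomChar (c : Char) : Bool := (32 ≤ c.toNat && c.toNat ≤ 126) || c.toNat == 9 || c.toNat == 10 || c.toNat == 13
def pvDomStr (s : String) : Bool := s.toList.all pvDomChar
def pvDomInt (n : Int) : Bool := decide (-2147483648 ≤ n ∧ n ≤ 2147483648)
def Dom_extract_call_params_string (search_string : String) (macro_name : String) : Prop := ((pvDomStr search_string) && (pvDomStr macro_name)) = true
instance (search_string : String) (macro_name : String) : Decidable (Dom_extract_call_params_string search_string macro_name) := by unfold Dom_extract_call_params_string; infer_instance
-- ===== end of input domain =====

-- B computes the first balanced bracket group as a start/end span and slices it out once,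
-- instead of A's character-by-character accumulation (objective: simpler).


-- ===== PORT A =====
-- A's for-loop over the characters of `part` with state (bracket_count, result);
-- `break`/`return` become returning the accumulated result directly.
-- (The `assert bracket_count > 0` raise is excluded by Pre_; there the port just continues.)
def pvLoopA : List Char → Int → List Char → List Char
  | [], _, res => res
  | c :: rest, bc, res =>
    if ¬ (c = '(' ∨ c = ')') then
      if bc = 0 then pvLoopA rest bc res
      else pvLoopA rest bc (res ++ [c])
    else if c = '(' then
      pvLoopA rest (bc + 1) (res ++ [c])
    else  -- c = ')'
      if bc - 1 = 0 then res ++ [c]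
      else pvLoopA rest (bc - 1) (res ++ [c])

def extract_call_params_string (search_string : String) (macro_name : String) : String :=
  -- part = search_string[search_string.index(macro_name):]  (Pre_ guarantees membership)
  let part := (PySem.Str.slice search_string (some (PySem.Str.find search_string macro_name)) none).toList
  String.ofList (pvLoopA part 0 [])

-- ===== PORT B =====
-- B's `for i, c in enumerate(part)` with state (depth, start); on the closing bracket of the
-- first group it returns the slice part[start:i+1]; after the loop, part[start:] or "".
def pvLoopB (part : List Char) : List Char → Nat → Int → Nat → List Char
  | [], _, depth, start =>
    if depth > 0 then PySem.List.slice part (some (start : Int)) none else []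
  | c :: rest, i, depth, start =>
    if c = '(' then
      pvLoopB part rest (i + 1) (depth + 1) (if depth = 0 then i else start)
    else if c = ')' then
      if depth - 1 = 0 then PySem.List.slice part (some (start : Int)) (some ((i : Int) + 1))
      else pvLoopB part rest (i + 1) (depth - 1) start
    else
      pvLoopB part rest (i + 1) depth start

def extract_call_params_string_alt (search_string : String) (macro_name : String) : String :=
  let part := (PySem.Str.slice search_string (some (PySem.Str.find search_string macro_name)) none).toList
  String.ofList (pvLoopB part part 0 0 0)

-- ===== PRECONDITION & SPEC =====
-- prefix bracket balance: #'(' − #')'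
def pvBal (p : List Char) : Int := (p.count '(' : Int) - (p.count ')' : Int)

-- Pre_ excludes exactly the inputs on which A raises AssertionError: macro_name must occur in
-- search_string, and in the suffix `part` no ')' may be reached at bracket depth 0 before the
-- first balanced group is closed (closed form: every ')' seen at balance 0 is preceded by the
-- closing ')' of the first group, i.e. a ')' at balance 1).
def Pre_extract_call_params_string (search_string : String) (macro_name : String) : Prop :=
  PySem.Str.isIn macro_name search_string = true ∧
  (∀ i, i < ((PySem.Str.slice search_string (some (PySem.Str.find search_string macro_name)) none).toList).length →
    (((PySem.Str.slice search_string (some (PySem.Str.find search_string macro_name)) none).toList).getD i ' ' = ')' ∧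
      pvBal (((PySem.Str.slice search_string (some (PySem.Str.find search_string macro_name)) none).toList).take i) = 0) →
    ∃ j, j < i ∧ ((PySem.Str.slice search_string (some (PySem.Str.find search_string macro_name)) none).toList).getD j ' ' = ')' ∧
      pvBal (((PySem.Str.slice search_string (some (PySem.Str.find search_string macro_name)) none).toList).take j) = 1)
instance (search_string : String) (macro_name : String) : Decidable (Pre_extract_call_params_string search_string macro_name) := by
  unfold Pre_extract_call_params_string; infer_instance

def pvWitness_extract_call_params_string : String × String := ("FOO (BAR (a, b), c)", "FOO")

def Spec_extract_call_params_string (search_string : String) (macro_name : String) (out : String) : Prop := out = extract_call_params_string_alt search_string macro_name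
instance (search_string : String) (macro_name : String) (out : String) : Decidable (Spec_extract_call_params_string search_string macro_name out) := by unfold Spec_extract_call_params_string; infer_instance

-- ===== CLAIM (what is proved, stated in full; the proofs are below) =====
def Claim_equal_extract_call_params_string : Prop := ∀ (search_string : String) (macro_name : String), Dom_extract_call_params_string search_string macro_name → Pre_extract_call_params_string search_string macro_name → Spec_extract_call_params_string search_string macro_name (extract_call_params_string search_string macro_name)

-- ===== LEMMAS AND PROOFS =====

theorem pv_drop_facts {L : List Char} {i : Nat} {c : Char} {rest : List Char}
    (h : L.drop i = c :: rest) :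
    i < L.length ∧ L.getD i ' ' = c ∧ L.drop (i + 1) = rest := by
  have hl : i < L.length := by
    have := congrArg List.length h; simp at this; omega
  refine ⟨hl, ?_, ?_⟩
  · have hsome : L[i]? = some c := by
      have := congrArg (·[0]?) h
      simpa [List.getElem?_drop] using this
    simp [List.getD, hsome]
  · have := congrArg List.tail h
    simpa [List.tail_drop] using this

theorem pv_take_succ {L : List Char} {i : Nat} {c : Char} {rest : List Char}
    (h : L.drop i = c :: rest) :
    L.take (i + 1) = L.take i ++ [c] := by
  have hsome : L[i]? = some c := by
    have := congrArg (·[0]?) h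
    simpa [List.getElem?_drop] using this
  simp [List.take_add_one, hsome]

theorem pv_bal_append (p : List Char) (c : Char) :
    pvBal (p ++ [c]) = pvBal p + (if c = '(' then 1 else if c = ')' then -1 else 0) := by
  unfold pvBal
  simp [List.count_append, List.count_singleton]
  split_ifs <;> simp_all <;> ring

-- depth-positive phase: A appends every char while B only moves the index; both stop at the
-- ')' closing the group, A returning the accumulator, B the slice part[start:i+1].
theorem pv_phase_pos (L : List Char) :
    ∀ (cs : List Char) (i start : Nat) (d : Int),
      L.drop i = cs → start ≤ i → 1 ≤ d →
      pvLoopA cs d ((L.take i).drop start) = pvLoopB L cs i d start := by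
  intro cs
  induction cs with
  | nil =>
    intro i start d hdrop hsi hd
    have hlen : L.length ≤ i := List.drop_eq_nil_iff.mp hdrop
    simp only [pvLoopA, pvLoopB, if_pos (show d > 0 by omega)]
    rw [PySem.List.slice_from_natCast, List.take_of_length_le hlen]
  | cons c rest ih =>
    intro i start d hdrop hsi hd
    obtain ⟨hi, hgd, hdrop'⟩ := pv_drop_facts hdrop
    have htake := pv_take_succ hdrop
    have hres : (L.take (i + 1)).drop start = (L.take i).drop start ++ [c] := by
      rw [htake, List.drop_append_of_le_length (by simp; omega)]
    by_cases hO : c = '('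
    · subst hO
      simp only [pvLoopA, pvLoopB, if_neg (show ¬ d = 0 by omega)]
      rw [← hres]
      exact ih (i + 1) start (d + 1) hdrop' (by omega) (by omega)
    · by_cases hC : c = ')'
      · subst hC
        by_cases hone : d - 1 = 0
        · have hcast : ((i : Int) + 1) = ((i + 1 : Nat) : Int) := by push_cast; ring
          have hslice : PySem.List.slice L (some (start : Int)) (some ((i : Int) + 1)) =
              (L.take (i + 1)).drop start := by
            rw [hcast, PySem.List.slice_natCast, ← List.drop_take]
          simp [pvLoopA, pvLoopB, hone, hslice, hres]
        · have hA : pvLoopA (')' :: rest) d ((L.take i).drop start) =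
              pvLoopA rest (d - 1) ((L.take i).drop start ++ [')']) := by
            simp [pvLoopA, hone]
          have hB : pvLoopB L (')' :: rest) i d start = pvLoopB L rest (i + 1) (d - 1) start := by
            simp [pvLoopB, hone]
          rw [hA, hB, ← hres]
          exact ih (i + 1) start (d - 1) hdrop' (by omega) (by omega)
      · simp only [pvLoopA, pvLoopB, if_pos (show ¬(c = '(' ∨ c = ')') by tauto),
          if_neg (show ¬ d = 0 by omega), if_neg hO, if_neg hC]
        rw [← hres]
        exact ih (i + 1) start d hdrop' (by omega) hd

-- depth-zero phase: before the first '(' everything is skipped; a ')' here is excluded by Pre_.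
theorem pv_phase_zero (L : List Char)
    (hPre : ∀ i, i < L.length → (L.getD i ' ' = ')' ∧ pvBal (L.take i) = 0) →
      ∃ j, j < i ∧ L.getD j ' ' = ')' ∧ pvBal (L.take j) = 1) :
    ∀ (cs : List Char) (i start : Nat),
      L.drop i = cs →
      (∀ j, j < i → L.getD j ' ' ≠ '(' ∧ L.getD j ' ' ≠ ')') →
      pvBal (L.take i) = 0 →
      pvLoopA cs 0 [] = pvLoopB L cs i 0 start := by
  intro cs
  induction cs with
  | nil => intro i start _ _ _; simp [pvLoopA, pvLoopB]
  | cons c rest ih =>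
    intro i start hdrop hinv hbal
    obtain ⟨hi, hgd, hdrop'⟩ := pv_drop_facts hdrop
    have htake := pv_take_succ hdrop
    by_cases hO : c = '('
    · subst hO
      simp only [pvLoopA, pvLoopB]
      have hres : (L.take (i + 1)).drop i = ['('] := by
        rw [htake, List.drop_append_of_le_length (by simp; omega)]
        simp
      rw [show ([] : List Char) ++ ['('] = ['('] from rfl, ← hres]
      exact pv_phase_pos L rest (i + 1) i 1 hdrop' (by omega) (by omega)
    · by_cases hC : c = ')'
      · subst hC
        obtain ⟨j, hj, hjc, -⟩ := hPre i hi ⟨hgd, hbal⟩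
        exact absurd hjc (hinv j hj).2
      · simp only [pvLoopA, pvLoopB, if_pos (show ¬(c = '(' ∨ c = ')') by tauto), if_neg hO, if_neg hC]
        refine ih (i + 1) start hdrop' ?_ ?_
        · intro j hjlt
          rcases Nat.lt_succ_iff_lt_or_eq.mp hjlt with h | h
          · exact hinv j h
          · subst h; rw [hgd]; exact ⟨hO, hC⟩
        · rw [htake, pv_bal_append, if_neg hO, if_neg hC, hbal]; ring


-- ===== VERDICT (by name: the statement is the Claim_ definition above) =====
theorem extract_call_params_string_spec : Claim_equal_extract_call_params_string := by
  intro s m _hDom hPre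
  unfold Spec_extract_call_params_string extract_call_params_string extract_call_params_string_alt
  obtain ⟨-, hScan⟩ := hPre
  exact congrArg String.ofList (pv_phase_zero _ hScan _ 0 0 rfl (by omega) rfl)
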